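-- pv_equiv track=rewrite | github.com/Sicario042/PL2023 | TPC2/tpc2.py | somaDigitos
-- ===== SOURCE A (Python) =====
-- def somaDigitos(linha):
--     total = 0
--     n = ''
--     for char in linha:
--         if char.isdigit():
--             n += char
--         else:
--             if n:
--                 total += int(n)
--                 n = ''
--         if char.lower() == 'o' and linha.lower().startswith('off'):
--             return None
--         elif char.lower() == 'o' and linha.lower().startswith('on'):
--             return total
--     if n:
--         total += int(n)
--     return total
-- ===== SOURCE B (Python) =====
-- def somaDigitos(linha):
--     low = linha.lower()
--     if low.startswith('off'):
--         return None
--     if low.startswith('on'):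
--         return 0
--     total = 0
--     i = 0
--     tam = len(linha)
--     while i < tam:
--         if linha[i].isdigit():
--             j = i
--             while j < tam and linha[j].isdigit():
--                 j += 1
--             total += int(linha[i:j])
--             i = j
--         else:
--             i += 1
--     return total
-- ===== Notes on version B (the rewrite author's own statement) =====
-- stated objective: simpler
-- what changed: The on/off early exit (which in A can only ever fire at index 0) is lifted out of the loop into two closed-form prefix guards, and the per-character accumulator-string state machine is replaced by a two-pointer scan that extracts each maximal digit run as a slice.
import Mathlib
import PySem

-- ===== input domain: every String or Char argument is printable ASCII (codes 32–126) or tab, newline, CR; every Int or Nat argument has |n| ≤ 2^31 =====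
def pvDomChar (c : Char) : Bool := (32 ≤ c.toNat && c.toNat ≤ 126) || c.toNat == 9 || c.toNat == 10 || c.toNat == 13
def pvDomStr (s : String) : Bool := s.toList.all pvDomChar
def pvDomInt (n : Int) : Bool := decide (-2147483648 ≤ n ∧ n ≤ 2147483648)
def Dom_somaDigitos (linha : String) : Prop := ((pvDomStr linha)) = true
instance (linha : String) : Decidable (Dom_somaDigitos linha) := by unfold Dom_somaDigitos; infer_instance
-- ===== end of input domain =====

-- B pulls the on/off early exit out of the loop as two closed-form prefix guards and sums
-- maximal digit runs with a two-pointer scan; same return value as A everywhere.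

-- int(s) on a digit run (both Pythons call int() only on nonempty all-digit strings, where it succeeds)
def pyIntDigits (n : List Char) : Int := (PySem.Int.ofChars? n).getD 0

-- ===== PORT A =====
def somaDigitosLoop (linha : List Char) : List Char → Int → List Char → Option Int
  | [], total, n => if n ≠ [] then some (total + pyIntDigits n) else some total
  | c :: rest, total, n =>
    let s : Int × List Char :=
      if PySem.Chars.isdigit c then (total, n ++ [c])
      else if n ≠ [] then (total + pyIntDigits n, ([] : List Char))
      else (total, n)
    if PySem.Chars.lowerChar c = 'o' ∧
        PySem.Chars.startswith (PySem.Chars.lower linha) ['o','f','f'] then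
      none
    else if PySem.Chars.lowerChar c = 'o' ∧
        PySem.Chars.startswith (PySem.Chars.lower linha) ['o','n'] then
      some s.1
    else
      somaDigitosLoop linha rest s.1 s.2

def somaDigitos (linha : String) : Option Int :=
  somaDigitosLoop linha.toList linha.toList 0 []

-- ===== PORT B =====
-- the two-pointer scan: on a digit, take the whole maximal digit run (inner while) and jump past it
def somaDigitosRuns : List Char → Int → Int
  | [], total => total
  | c :: rest, total =>
    if PySem.Chars.isdigit c then
      somaDigitosRuns ((c :: rest).dropWhile PySem.Chars.isdigit)
        (total + pyIntDigits ((c :: rest).takeWhile PySem.Chars.isdigit))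
    else somaDigitosRuns rest total
termination_by cs _ => cs.length
decreasing_by
  · have h := List.length_dropWhile_le PySem.Chars.isdigit rest
    simp only [List.dropWhile_cons, *]
    simp
    omega
  · simp

def somaDigitos_alt (linha : String) : Option Int :=
  if PySem.Chars.startswith (PySem.Chars.lower linha.toList) ['o','f','f'] then none
  else if PySem.Chars.startswith (PySem.Chars.lower linha.toList) ['o','n'] then some 0
  else some (somaDigitosRuns linha.toList 0)

-- ===== PRECONDITION & SPEC =====
def Spec_somaDigitos (linha : String) (out : Option Int) : Prop := out = somaDigitos_alt linha
instance (linha : String) (out : Option Int) : Decidable (Spec_somaDigitos linha out) := by unfold Spec_somaDigitos; infer_instance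

-- ===== CLAIM (what is proved, stated in full; the proofs are below) =====
def Claim_equal_somaDigitos : Prop := ∀ (linha : String), Dom_somaDigitos linha → Spec_somaDigitos linha (somaDigitos linha)

-- ===== LEMMAS AND PROOFS =====

theorem takeWhile_runs_append (p : Char → Bool) (n : List Char)
    (h : ∀ a ∈ n, p a = true) (c : Char) (hc : p c = false) (rest : List Char) :
    (n ++ c :: rest).takeWhile p = n ∧ (n ++ c :: rest).dropWhile p = c :: rest := by
  induction n with
  | nil => simp [hc]
  | cons a as ih =>
    have ha : p a = true := h a (by simp)
    have ih' := ih (fun x hx => h x (by simp [hx]))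
    simp [ha, ih'.1, ih'.2]

-- when neither prefix guard fires, A's loop computes B's run sum
theorem loop_eq_runs (linha : List Char)
    (hoff : PySem.Chars.startswith (PySem.Chars.lower linha) ['o','f','f'] = false)
    (hon : PySem.Chars.startswith (PySem.Chars.lower linha) ['o','n'] = false) :
    ∀ (cs : List Char) (total : Int) (n : List Char),
      (∀ a ∈ n, PySem.Chars.isdigit a = true) →
      somaDigitosLoop linha cs total n = some (somaDigitosRuns (n ++ cs) total) := by
  intro cs
  induction cs with
  | nil =>
    intro total n hn
    by_cases h : n = []
    · subst h; simp [somaDigitosLoop, somaDigitosRuns]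
    · obtain ⟨d, ds, rfl⟩ := List.exists_cons_of_ne_nil h
      have hd : PySem.Chars.isdigit d = true := hn d (by simp)
      have htw : (d :: ds).takeWhile PySem.Chars.isdigit = d :: ds :=
        List.takeWhile_eq_self_iff.2 hn
      have hdw : (d :: ds).dropWhile PySem.Chars.isdigit = [] :=
        List.dropWhile_eq_nil_iff.2 hn
      rw [List.append_nil, somaDigitosRuns]
      simp [somaDigitosLoop, hd, htw, hdw, somaDigitosRuns]
  | cons c rest ih =>
    intro total n hn
    rw [somaDigitosLoop]
    simp only [hoff, hon, Bool.false_eq_true, and_false, if_false]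
    by_cases hd : PySem.Chars.isdigit c = true
    · have hn' : ∀ a ∈ n ++ [c], PySem.Chars.isdigit a = true := by
        intro a ha; rcases List.mem_append.1 ha with h | h
        · exact hn a h
        · simp at h; subst h; exact hd
      simp only [hd, if_pos]
      rw [ih total (n ++ [c]) hn']
      simp
    · have hd' : PySem.Chars.isdigit c = false := by simpa using hd
      by_cases h : n = []
      · subst h
        simp only [hd', Bool.false_eq_true, if_false, ne_eq, not_true_eq_false,
          List.nil_append]
        rw [ih total [] (by simp), somaDigitosRuns]
        simp [hd']
      · obtain ⟨d, ds, rfl⟩ := List.exists_cons_of_ne_nil h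
        have hdd : PySem.Chars.isdigit d = true := hn d (by simp)
        obtain ⟨htw, hdw⟩ := takeWhile_runs_append PySem.Chars.isdigit (d :: ds) hn c hd' rest
        simp only [hd', Bool.false_eq_true, if_false, ne_eq, reduceCtorEq,
          not_false_eq_true, if_true]
        rw [ih (total + pyIntDigits (d :: ds)) [] (by simp)]
        have : (d :: ds) ++ c :: rest = d :: (ds ++ c :: rest) := by simp
        rw [this, somaDigitosRuns]
        simp only [hdd, if_pos]
        rw [show d :: (ds ++ c :: rest) = (d :: ds) ++ c :: rest by simp, htw, hdw,
          somaDigitosRuns]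
        simp [hd']

-- a nonempty lowered prefix fixes the (lowered) first character of linha
theorem first_char_of_prefix (c : Char) (rest t p : List Char) (x : Char)
    (ht : (x :: p) ++ t = PySem.Chars.lower (c :: rest)) :
    PySem.Chars.lowerChar c = x := by
  simp [PySem.Chars.lower] at ht
  exact ht.1.symm

-- ===== VERDICT (by name: the statement is the Claim_ definition above) =====
theorem somaDigitos_spec : Claim_equal_somaDigitos := by
  unfold Claim_equal_somaDigitos Spec_somaDigitos
  intro linha _
  unfold somaDigitos somaDigitos_alt
  by_cases hoff : PySem.Chars.startswith (PySem.Chars.lower linha.toList) ['o','f','f'] = true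
  · obtain ⟨t, ht⟩ := (PySem.Chars.startswith_iff _ _).1 hoff
    cases hcs : linha.toList with
    | nil => rw [hcs] at ht; simp [PySem.Chars.lower] at ht
    | cons c rest =>
      rw [hcs] at ht hoff
      have hc := first_char_of_prefix c rest t ['f','f'] 'o' ht
      rw [somaDigitosLoop]
      simp [hc, hoff]
  · have hoff' : PySem.Chars.startswith (PySem.Chars.lower linha.toList) ['o','f','f'] = false := by
      simpa using hoff
    by_cases hon : PySem.Chars.startswith (PySem.Chars.lower linha.toList) ['o','n'] = true
    · obtain ⟨t, ht⟩ := (PySem.Chars.startswith_iff _ _).1 hon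
      cases hcs : linha.toList with
      | nil => rw [hcs] at ht; simp [PySem.Chars.lower] at ht
      | cons c rest =>
        rw [hcs] at ht hon hoff'
        have hc := first_char_of_prefix c rest t ['n'] 'o' ht
        rw [somaDigitosLoop]
        simp only [hoff', Bool.false_eq_true, and_false, if_false, hon, hc, and_true,
          if_pos]
        by_cases hd : PySem.Chars.isdigit c = true <;> simp [hd]
    · have hon' : PySem.Chars.startswith (PySem.Chars.lower linha.toList) ['o','n'] = false := by
        simpa using hon
      rw [loop_eq_runs linha.toList hoff' hon' linha.toList 0 [] (by simp)]
      simp [hoff', hon']
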